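-- pv_equiv track=rewrite | github.com/hailey-hy/Algorithm-python | Programmers/day8-1.py | solution
-- ===== SOURCE A (Python) =====
-- from collections import deque
--
-- def solution(prices):
--     prices = deque(prices)
--     answer = []
--     while prices:
--         now = prices.popleft()
--         cnt = 0
--         for i in prices:
--             cnt += 1
--             if i < now:
--                 break
--
--         answer.append(cnt)
--
--     return answer
-- ===== SOURCE B (Python) =====
-- def solution(prices):
--     n = len(prices)
--     ans = [0] * n
--     stack = []  # (index, price), price non-increasing from top of stack downward? top has largest
--     for j, p in enumerate(prices):
--         while stack and stack[-1][1] > p: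
--             i, _ = stack.pop()
--             ans[i] = j - i
--         stack.append((j, p))
--     for i, _ in stack:
--         ans[i] = n - 1 - i
--     return ans
-- ===== Notes on version B (the rewrite author's own statement) =====
-- stated objective: faster
-- what changed: Replaced A's per-element rescan of the remaining deque with a single pass using a monotonic index stack that resolves each index's duration when a strictly smaller price arrives, plus a final sweep for unresolved indices.
import Mathlib
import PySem

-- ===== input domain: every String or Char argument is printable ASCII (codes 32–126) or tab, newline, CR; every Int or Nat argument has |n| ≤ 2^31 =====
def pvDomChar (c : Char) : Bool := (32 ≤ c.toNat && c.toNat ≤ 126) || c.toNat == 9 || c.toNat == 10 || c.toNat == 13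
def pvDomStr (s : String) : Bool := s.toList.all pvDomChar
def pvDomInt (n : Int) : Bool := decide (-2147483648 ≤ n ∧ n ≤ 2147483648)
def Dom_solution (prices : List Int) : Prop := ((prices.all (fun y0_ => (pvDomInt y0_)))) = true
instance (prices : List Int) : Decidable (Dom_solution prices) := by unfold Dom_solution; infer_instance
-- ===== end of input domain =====

-- B replaces A's quadratic rescan of the remaining deque by a monotonic index stack
-- resolved on each price drop (asymptotically faster); return value proved equal.

-- ===== PORT A =====
-- inner 'for i in prices: cnt += 1; if i < now: break'
def cntA (now : Int) : List Int → Int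
  | [] => 0
  | x :: xs => if x < now then 1 else 1 + cntA now xs

-- 'while prices: now = prices.popleft(); … answer.append(cnt)'
def solution : List Int → List Int
  | [] => []
  | x :: xs => cntA x xs :: solution xs

-- ===== PORT B =====
-- 'while stack and stack[-1][1] > p: i,_ = stack.pop(); ans[i] = j - i'
def popResolve (j : Nat) (p : Int) : List (Nat × Int) → List Int → List (Nat × Int) × List Int
  | [], ans => ([], ans)
  | (i, q) :: st, ans =>
    if p < q then popResolve j p st (ans.set i ((j : Int) - (i : Int)))
    else ((i, q) :: st, ans)

-- 'for j, p in enumerate(prices): …'  (structural recursion carrying the index j)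
def loopB (n : Nat) : List Int → Nat → List (Nat × Int) → List Int → List Int
  | [], _, st, ans =>
      -- 'for i,_ in stack: ans[i] = n - 1 - i'
      st.foldl (fun a e => a.set e.1 ((n : Int) - 1 - (e.1 : Int))) ans
  | p :: rest, j, st, ans =>
      let r := popResolve j p st ans
      loopB n rest (j + 1) ((j, p) :: r.1) r.2

def solution_alt (prices : List Int) : List Int :=
  loopB prices.length prices 0 [] (List.replicate prices.length 0)

-- ===== PRECONDITION & SPEC =====
def Spec_solution (prices : List Int) (out : List Int) : Prop := out = solution_alt prices
instance (prices : List Int) (out : List Int) : Decidable (Spec_solution prices out) := by unfold Spec_solution; infer_instance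

-- ===== CLAIM (what is proved, stated in full; the proofs are below) =====
def Claim_equal_solution : Prop := ∀ (prices : List Int), Dom_solution prices → Spec_solution prices (solution prices)


-- ===== LEMMAS AND PROOFS =====

-- price at index i (0 when out of range; only used in range)
def pg (p : List Int) (i : Nat) : Int := p.getD i 0

-- the value A computes at index i
def F (p : List Int) (i : Nat) : Int := cntA (pg p i) (p.drop (i + 1))

theorem getD_drop (p : List Int) (a k : Nat) (h : a + k < p.length) :
    (p.drop a).getD k 0 = p.getD (a + k) 0 := by
  have hk : k < (p.drop a).length := by simp [List.length_drop]; omega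
  rw [List.getD_eq_getElem _ _ hk, List.getD_eq_getElem _ _ h]
  simp [List.getElem_drop]

theorem cntA_eq_of_found : ∀ (xs : List Int) (now : Int) (m : Nat), m < xs.length →
    (∀ k, k < m → now ≤ xs.getD k 0) → xs.getD m 0 < now → cntA now xs = (m : Int) + 1 := by
  intro xs
  induction xs with
  | nil => intro now m hm; simp at hm
  | cons x xs ih =>
    intro now m hm hk hlt
    cases m with
    | zero => simp [List.getD] at hlt; simp [cntA, hlt]
    | succ m' =>
      have h0 : now ≤ x := by have := hk 0 (by omega); simpa [List.getD] using this
      have hx : ¬ x < now := by omega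
      have := ih now m' (by simpa using hm) (fun k hkm => by
          have := hk (k+1) (by omega); simpa [List.getD] using this)
        (by simpa [List.getD] using hlt)
      simp [cntA, hx, this]; ring

theorem cntA_eq_of_none : ∀ (xs : List Int) (now : Int),
    (∀ k, k < xs.length → now ≤ xs.getD k 0) → cntA now xs = (xs.length : Int) := by
  intro xs
  induction xs with
  | nil => intro now _; simp [cntA]
  | cons x xs ih =>
    intro now hk
    have h0 : now ≤ x := by have := hk 0 (by simp); simpa [List.getD] using this
    have hx : ¬ x < now := by omega
    have := ih now (fun k hkm => by have := hk (k+1) (by simpa using hkm); simpa [List.getD] using this)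
    simp [cntA, hx, this]; ring

theorem F_found (p : List Int) (i j : Nat) (hij : i < j) (hj : j < p.length)
    (hless : pg p j < pg p i) (hmono : ∀ k, i < k → k < j → pg p i ≤ pg p k) :
    F p i = (j : Int) - (i : Int) := by
  have hm : j - (i+1) < (p.drop (i+1)).length := by simp [List.length_drop]; omega
  have := cntA_eq_of_found (p.drop (i+1)) (pg p i) (j - (i+1)) hm
    (fun k hk => by
      rw [getD_drop p (i+1) k (by omega)]
      exact hmono (i+1+k) (by omega) (by omega))
    (by rw [getD_drop p (i+1) (j - (i+1)) (by omega)]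
        have : i + 1 + (j - (i+1)) = j := by omega
        rw [this]; exact hless)
  rw [F, this]; omega

theorem F_none (p : List Int) (i : Nat) (hi : i < p.length)
    (hmono : ∀ k, i < k → k < p.length → pg p i ≤ pg p k) :
    F p i = (p.length : Int) - 1 - (i : Int) := by
  have := cntA_eq_of_none (p.drop (i+1)) (pg p i)
    (fun k hk => by
      have hk' : i + 1 + k < p.length := by simp [List.length_drop] at hk; omega
      rw [getD_drop p (i+1) k hk']
      exact hmono (i+1+k) (by omega) (by omega))
  rw [F, this]; simp [List.length_drop]; omega

-- A's output characterised pointwise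
theorem solution_eq_map : ∀ p : List Int, solution p = (List.range p.length).map (F p) := by
  intro p
  induction p with
  | nil => simp [solution]
  | cons x xs ih =>
    have h0 : F (x :: xs) 0 = cntA x xs := by simp [F, pg, List.getD]
    have hs : ∀ i, F (x :: xs) (i+1) = F xs i := by
      intro i; simp [F, pg, List.getD]
    simp [solution, ih, List.range_succ_eq_map, h0, hs, Function.comp]

-- popResolve frame / length lemmas
theorem popResolve_length (j : Nat) (x : Int) :
    ∀ (st : List (Nat × Int)) (ans : List Int),
      (popResolve j x st ans).2.length = ans.length := by
  intro st
  induction st with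
  | nil => intro ans; simp [popResolve]
  | cons e tl ih =>
    intro ans
    obtain ⟨i, q⟩ := e
    by_cases h : x < q
    · simp [popResolve, h, ih]
    · simp [popResolve, h]

theorem popResolve_frame (j : Nat) (x : Int) :
    ∀ (st : List (Nat × Int)) (ans : List Int) (i : Nat),
      (∀ e ∈ st, e.1 ≠ i) →
      (popResolve j x st ans).2.getD i 0 = ans.getD i 0 := by
  intro st
  induction st with
  | nil => intro ans i _; simp [popResolve]
  | cons e tl ih =>
    intro ans i hne
    obtain ⟨i0, q⟩ := e
    by_cases h : x < q
    · rw [popResolve]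
      simp only [h, if_pos]
      rw [ih _ i (fun e he => hne e (List.mem_cons_of_mem _ he))]
      have hi0 : i0 ≠ i := hne (i0, q) (List.mem_cons_self ..)
      simp [List.getD, List.getElem?_set_ne hi0]
    · simp [popResolve, h]

theorem popResolve_suffix (j : Nat) (x : Int) :
    ∀ (st : List (Nat × Int)) (ans : List Int),
      (popResolve j x st ans).1 <:+ st := by
  intro st
  induction st with
  | nil => intro ans; simp [popResolve]
  | cons e tl ih =>
    intro ans
    obtain ⟨i, q⟩ := e
    by_cases h : x < q
    · rw [popResolve]; simp only [h, if_pos]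
      exact (ih _).trans (List.suffix_cons _ _)
    · simp [popResolve, h]

theorem popResolve_kept_le (j : Nat) (x : Int) :
    ∀ (st : List (Nat × Int)) (ans : List Int),
      List.Pairwise (fun a b : Nat × Int => b.1 < a.1 ∧ b.2 ≤ a.2) st →
      ∀ e ∈ (popResolve j x st ans).1, e.2 ≤ x := by
  intro st
  induction st with
  | nil => intro ans _ e he; simp [popResolve] at he
  | cons e0 tl ih =>
    intro ans hpw e he
    obtain ⟨i, q⟩ := e0
    by_cases h : x < q
    · rw [popResolve] at he; simp only [h, if_pos] at he
      exact ih _ hpw.of_cons e he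
    · simp only [popResolve, h, if_neg, not_false_iff] at he
      rcases List.mem_cons.1 he with rfl | he'
      · omega
      · have := (List.pairwise_cons.1 hpw).1 e he'
        omega

theorem popResolve_popped (j : Nat) (x : Int) :
    ∀ (st : List (Nat × Int)) (ans : List Int),
      List.Pairwise (fun a b : Nat × Int => b.1 < a.1 ∧ b.2 ≤ a.2) st →
      (∀ e ∈ st, e.1 < ans.length) →
      ∀ e ∈ st, (∀ e' ∈ (popResolve j x st ans).1, e'.1 ≠ e.1) →
        x < e.2 ∧ (popResolve j x st ans).2.getD e.1 0 = (j : Int) - (e.1 : Int) := by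
  intro st
  induction st with
  | nil => intro ans _ _ e he; simp at he
  | cons e0 tl ih =>
    intro ans hpw hlen e he hnotin
    obtain ⟨i0, q0⟩ := e0
    by_cases h : x < q0
    · rw [popResolve] at hnotin ⊢
      simp only [h, if_pos] at hnotin ⊢
      rcases List.mem_cons.1 he with rfl | he'
      · refine ⟨h, ?_⟩
        rw [popResolve_frame j x tl _ i0
            (fun e' he' => Nat.ne_of_lt (((List.pairwise_cons.1 hpw).1 e' he').1))]
        have hl : i0 < ans.length := hlen (i0, q0) (List.mem_cons_self ..)
        simp [List.getD, List.getElem?_set_self hl]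
      · exact ih _ hpw.of_cons
          (fun e' he'' => by rw [List.length_set]; exact hlen e' (List.mem_cons_of_mem _ he''))
          e he' hnotin
    · rw [popResolve] at hnotin
      simp only [h, if_neg, not_false_iff] at hnotin
      exact absurd rfl (hnotin e he)

-- the final resolve loop
theorem foldl_set_length (n : Nat) :
    ∀ (st : List (Nat × Int)) (ans : List Int),
      (st.foldl (fun a e => a.set e.1 ((n : Int) - 1 - (e.1 : Int))) ans).length = ans.length := by
  intro st
  induction st with
  | nil => intro ans; simp
  | cons e tl ih => intro ans; simp [List.foldl_cons, ih]

theorem foldl_set_spec (n : Nat) :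
    ∀ (st : List (Nat × Int)) (ans : List Int) (i : Nat), i < ans.length →
      (st.foldl (fun a e => a.set e.1 ((n : Int) - 1 - (e.1 : Int))) ans).getD i 0 =
        if ∃ e ∈ st, e.1 = i then (n : Int) - 1 - (i : Int) else ans.getD i 0 := by
  intro st
  induction st with
  | nil => intro ans i _; simp
  | cons e tl ih =>
    intro ans i hi
    rw [List.foldl_cons, ih _ i (by simpa using hi)]
    by_cases htl : ∃ e' ∈ tl, e'.1 = i
    · have hall : ∃ e' ∈ e :: tl, e'.1 = i := by
        obtain ⟨e', he', hei⟩ := htl; exact ⟨e', List.mem_cons_of_mem _ he', hei⟩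
      rw [if_pos htl, if_pos hall]
    · by_cases hei : e.1 = i
      · subst hei
        have hall : ∃ e' ∈ e :: tl, e'.1 = e.1 := ⟨e, List.mem_cons_self .., rfl⟩
        rw [if_neg htl, if_pos hall]
        simp [List.getD, List.getElem?_set_self hi]
      · have hall : ¬ ∃ e' ∈ e :: tl, e'.1 = i := by
          rintro ⟨e', he', rfl⟩
          rcases List.mem_cons.1 he' with rfl | h'
          · exact hei rfl
          · exact htl ⟨e', h', rfl⟩
        rw [if_neg htl, if_neg hall]
        simp [List.getD, List.getElem?_set_ne hei]

-- main loop invariant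
theorem loopB_correct (p : List Int) :
    ∀ (rest : List Int) (j : Nat) (st : List (Nat × Int)) (ans : List Int),
      rest = p.drop j → j ≤ p.length →
      (∀ e ∈ st, e.1 < j ∧ e.2 = pg p e.1) →
      List.Pairwise (fun a b : Nat × Int => b.1 < a.1 ∧ b.2 ≤ a.2) st →
      (∀ e ∈ st, ∀ k, e.1 < k → k < j → pg p e.1 ≤ pg p k) →
      ans.length = p.length →
      (∀ i, i < j → (∀ e ∈ st, e.1 ≠ i) → ans.getD i 0 = F p i) →
      loopB p.length rest j st ans = (List.range p.length).map (F p) := by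
  intro rest
  induction rest with
  | nil =>
    intro j st ans hrest hj h3 h4 h5 h6 h7
    have hjn : j = p.length := by
      have := congrArg List.length hrest
      simp [List.length_drop] at this; omega
    subst hjn
    rw [loopB]
    apply List.ext_getElem
    · rw [foldl_set_length]; simp [h6]
    · intro i hi hi2
      have hi' : i < p.length := by simpa using hi2
      rw [← List.getD_eq_getElem _ 0 hi]
      rw [foldl_set_spec p.length st ans i (by omega)]
      have hmap : ((List.range p.length).map (F p))[i] = F p i := by
        simp
      rw [hmap]
      by_cases hex : ∃ e ∈ st, e.1 = i
      · rw [if_pos hex]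
        obtain ⟨e, he, hei⟩ := hex
        rw [F_none p i hi' (fun k hk1 hk2 => by
          have := h5 e he k (by omega) (by omega)
          rw [hei] at this; exact this)]
      · rw [if_neg hex]
        exact h7 i hi' (fun e he hc => hex ⟨e, he, hc⟩)
  | cons x rest' ih =>
    intro j st ans hrest hj h3 h4 h5 h6 h7
    have hjlt : j < p.length := by
      by_contra hc
      have : p.drop j = [] := List.drop_eq_nil_of_le (by omega)
      rw [this] at hrest; exact List.cons_ne_nil _ _ hrest
    have hx : x = pg p j := by
      have h0 := getD_drop p j 0 (by omega)
      rw [← hrest] at h0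
      simpa [pg, List.getD] using h0
    have hrest' : rest' = p.drop (j + 1) := by
      have ht : (p.drop j).tail = p.drop (j + 1) := by
        rw [List.tail_drop]
      rw [← hrest] at ht
      simpa using ht
    rw [loopB]
    have hsuf := popResolve_suffix j x st ans
    have hsub := hsuf.sublist
    have hmem : ∀ e ∈ (popResolve j x st ans).1, e ∈ st := fun e he => hsub.mem he
    have hkept := popResolve_kept_le j x st ans h4
    have hlen' := popResolve_length j x st ans
    apply ih (j + 1) _ _ hrest' (by omega)
    · intro e he
      rcases List.mem_cons.1 he with rfl | he'
      · exact ⟨by omega, hx⟩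
      · have := h3 e (hmem e he')
        exact ⟨by omega, this.2⟩
    · rw [List.pairwise_cons]
      refine ⟨fun e he => ⟨(h3 e (hmem e he)).1, hkept e he⟩, h4.sublist hsub⟩
    · intro e he k hk1 hk2
      rcases List.mem_cons.1 he with rfl | he'
      · omega
      · by_cases hkj : k < j
        · exact h5 e (hmem e he') k hk1 hkj
        · have hkj' : k = j := by omega
          subst hkj'
          rw [← (h3 e (hmem e he')).2, ← hx]
          exact hkept e he'
    · omega
    · intro i hij hne
      have hne' : ∀ e ∈ (popResolve j x st ans).1, e.1 ≠ i :=
        fun e he => hne e (List.mem_cons_of_mem _ he)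
      have hij' : i < j := by
        have := hne (j, x) (List.mem_cons_self ..)
        simp at this; omega
      by_cases hex : ∃ e ∈ st, e.1 = i
      · obtain ⟨e, he, hei⟩ := hex
        have hpopped := popResolve_popped j x st ans h4
          (fun e' he' => by have := (h3 e' he').1; omega)
          e he (fun e' he' => by rw [hei]; exact hne' e' he')
        rw [hei] at hpopped
        rw [hpopped.2]
        have hlt : pg p j < pg p i := by
          have := hpopped.1
          rw [(h3 e he).2, hei] at this
          rw [← hx]; exact this
        rw [F_found p i j (by omega) hjlt hlt (fun k hk1 hk2 => by
          have := h5 e he k (by omega) (by omega)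
          rw [hei] at this; exact this)]
      · rw [popResolve_frame j x st ans i (fun e he hc => hex ⟨e, he, hc⟩)]
        exact h7 i (by omega) (fun e he hc => hex ⟨e, he, hc⟩)

theorem solution_spec' (p : List Int) : solution p = solution_alt p := by
  rw [solution_eq_map, solution_alt]
  exact (loopB_correct p p 0 [] (List.replicate p.length 0) (by simp) (by simp)
    (by simp) (by simp) (by simp) (by simp) (by intro i hi; omega)).symm


-- ===== VERDICT (by name: the statement is the Claim_ definition above) =====
theorem solution_spec : Claim_equal_solution := by
  intro p _
  unfold Spec_solution
  exact solution_spec' p
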